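-- pv_equiv track=rewrite | github.com/Ben-Edwards44/Advent-Of-Code | 2023/day15.py | apply_hash
-- ===== SOURCE A (Python) =====
-- def apply_hash(string):
--     current_value = 0
--
--     for i in string:
--         code = ord(i)
--         current_value += code
--         current_value *= 17
--         current_value %= 256
--
--     return current_value
-- ===== SOURCE B (Python) =====
-- def apply_hash(string):
--     n = len(string)
--     total = sum(ord(c) * pow(17, n - i, 256) for i, c in enumerate(string))
--     return total % 256
-- ===== Notes on version B (the rewrite author's own statement) =====
-- stated objective: alternative
-- what changed: Replaces A's rolling multiply-and-mod fold with a closed-form weighted sum: each character code is weighted by 17^(n-i) via enumerate, summed once, and reduced mod 256 only at the end.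
import Mathlib
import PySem

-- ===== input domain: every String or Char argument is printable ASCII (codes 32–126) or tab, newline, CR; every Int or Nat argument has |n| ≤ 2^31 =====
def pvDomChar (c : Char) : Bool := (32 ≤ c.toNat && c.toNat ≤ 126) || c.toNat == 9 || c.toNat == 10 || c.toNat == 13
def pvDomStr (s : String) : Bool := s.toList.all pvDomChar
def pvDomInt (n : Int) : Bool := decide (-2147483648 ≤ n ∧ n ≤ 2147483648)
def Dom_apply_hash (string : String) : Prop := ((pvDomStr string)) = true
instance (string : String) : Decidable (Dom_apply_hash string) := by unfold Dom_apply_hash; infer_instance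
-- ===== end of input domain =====

-- B replaces A's per-character rolling multiply-and-mod fold by a closed-form weighted
-- sum (code_i · 17^(n-i)) reduced mod 256 once at the end (objective: alternative).

-- ===== PORT A =====
-- literal port: rolling accumulator, (v + code) * 17 % 256 at every character
def apply_hash (string : String) : Int :=
  string.toList.foldl
    (fun current_value i =>
      PySem.Int.mod ((current_value + (i.toNat : Int)) * 17) 256) 0

-- ===== PORT B =====
-- literal port of Source B: weighted sum over enumerate (weights via pow(17, e, 256)),
-- single mod of the sum at the end
def apply_hash_alt (string : String) : Int :=
  let n := string.toList.length
  let total :=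
    ((PySem.List.enumerate string.toList 0).map
      (fun p => ((p.2.toNat : Int)) * (17 ^ (n - p.1.toNat) % 256))).sum
  PySem.Int.mod total 256

-- ===== PRECONDITION & SPEC =====
def Spec_apply_hash (string : String) (out : Int) : Prop := out = apply_hash_alt string
instance (string : String) (out : Int) : Decidable (Spec_apply_hash string out) := by unfold Spec_apply_hash; infer_instance

-- ===== CLAIM (what is proved, stated in full; the proofs are below) =====
def Claim_equal_apply_hash : Prop := ∀ (string : String), Dom_apply_hash string → Spec_apply_hash string (apply_hash string)

-- ===== LEMMAS AND PROOFS =====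

-- weighted sum Σ code_i · 17^(n-i) with the weights written structurally
def pvWsum : List Char → Int
  | [] => 0
  | c :: l => ((c.toNat : Int)) * 17 ^ (l.length + 1) + pvWsum l

theorem pvFoldA (l : List Char) (v : Int) (hv : 0 ≤ v ∧ v < 256) :
    l.foldl (fun cv i => ((cv + (i.toNat : Int)) * 17) % 256) v
      = (v * 17 ^ l.length + pvWsum l) % 256 := by
  induction l generalizing v with
  | nil =>
      simp only [List.foldl_nil, List.length_nil, pvWsum, pow_zero, mul_one, add_zero]
      omega
  | cons c l ih =>
      have hrange : 0 ≤ ((v + (c.toNat : Int)) * 17) % 256 ∧ ((v + (c.toNat : Int)) * 17) % 256 < 256 :=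
        ⟨Int.emod_nonneg _ (by norm_num), Int.emod_lt_of_pos _ (by norm_num)⟩
      simp only [List.foldl_cons, ih _ hrange, pvWsum, List.length_cons]
      have hmod : ((((v + (c.toNat : Int)) * 17) % 256)) ≡ ((v + (c.toNat : Int)) * 17) [ZMOD 256] :=
        Int.emod_emod_of_dvd _ dvd_rfl
      have h := (hmod.mul_right (17 ^ l.length)).add_right (pvWsum l)
      calc ((v + (c.toNat : Int)) * 17 % 256 * 17 ^ l.length + pvWsum l) % 256
          = ((v + (c.toNat : Int)) * 17 * 17 ^ l.length + pvWsum l) % 256 := h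
        _ = (v * 17 ^ (l.length + 1) + (((c.toNat : Int)) * 17 ^ (l.length + 1) + pvWsum l)) % 256 := by
              ring_nf

theorem pvSumB (l : List Char) (s : Nat) :
    ((PySem.List.enumerate l (s : Int)).map
        (fun p => ((p.2.toNat : Int)) * (17 ^ (s + l.length - p.1.toNat) % 256))).sum
      ≡ pvWsum l [ZMOD 256] := by
  induction l generalizing s with
  | nil => simp [pvWsum]
  | cons c l ih =>
      have hcast : ((s : Int) + 1) = (((s + 1 : Nat) : Int)) := by push_cast; ring
      simp only [PySem.List.enumerate_cons, List.map_cons, List.sum_cons, List.length_cons,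
        Int.toNat_natCast, hcast]
      have harith : s + (l.length + 1) - s = l.length + 1 := by omega
      have harith2 : ∀ p : Int × Char, s + 1 + l.length - p.1.toNat = s + (l.length + 1) - p.1.toNat := by
        intro p; omega
      simp only [harith, pvWsum]
      have hmapeq : (List.map (fun p : Int × Char => ((p.2.toNat : Int)) * (17 ^ (s + (l.length + 1) - p.1.toNat) % 256)) (PySem.List.enumerate l ((s + 1 : Nat) : Int)))
          = List.map (fun p : Int × Char => ((p.2.toNat : Int)) * (17 ^ (s + 1 + l.length - p.1.toNat) % 256)) (PySem.List.enumerate l ((s + 1 : Nat) : Int)) := by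
        apply List.map_congr_left; intro p _; rw [harith2]
      rw [hmapeq]
      have hpow : ((17 : Int) ^ (l.length + 1) % 256) ≡ (17 : Int) ^ (l.length + 1) [ZMOD 256] :=
        Int.emod_emod_of_dvd _ dvd_rfl
      have hhead : ((c.toNat : Int)) * ((17 : Int) ^ (l.length + 1) % 256) ≡ ((c.toNat : Int)) * 17 ^ (l.length + 1) [ZMOD 256] :=
        hpow.mul_left _
      exact hhead.add (ih (s + 1))

-- ===== VERDICT (by name: the statement is the Claim_ definition above) =====
theorem apply_hash_spec : Claim_equal_apply_hash := by
  intro s _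
  unfold Spec_apply_hash apply_hash apply_hash_alt
  have h256 : (0 : Int) < 256 := by norm_num
  simp only [PySem.Int.mod_eq_emod_of_pos h256]
  have hB := pvSumB s.toList 0
  simp only [Nat.zero_add] at hB
  rw [show ((0 : Nat) : Int) = (0 : Int) from rfl] at hB
  rw [pvFoldA s.toList 0 (by norm_num)]
  simpa using hB.symm
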